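-- pv_equiv track=rewrite | github.com/AnastasiaGoryacheva/homework26-cw2 | PycharmProjects/coursework2/utils.py | get_post_by_tags
-- ===== SOURCE A (Python) =====
-- def get_post_by_tags(content):
--     """Возвращает текст поста с активными тэгами."""
--     content = content.split()
--     new_content = []
--     for word in content:
--         if "#" in word:
--             w =  word.replace(word, f'<a href="/tag/{word[1:].lower()}">{word}</a>')
--             new_content.append(w)
--         else:
--             new_content.append(word)
--     return " ".join(new_content)
-- ===== SOURCE B (Python) =====
-- def get_post_by_tags(content):
--     """Возвращает текст поста с активными тэгами."""
--     out = []
--     i = 0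
--     n = len(content)
--     first = True
--     while i < n:
--         if content[i].isspace():
--             i += 1
--             continue
--         j = i
--         while j < n and not content[j].isspace():
--             j += 1
--         word = content[i:j]
--         if not first:
--             out.append(" ")
--         if "#" in word:
--             out.append(f'<a href="/tag/{word[1:].lower()}">{word}</a>')
--         else:
--             out.append(word)
--         first = False
--         i = j
--     return "".join(out)
-- ===== Notes on version B (the rewrite author's own statement) =====
-- stated objective: alternative
-- what changed: A splits the text into a word list, builds a new list with a loop over it and joins it; B makes a single character-level scan of the string that skips whitespace, delimits each word in place and emits it (wrapped if it contains '#') directly into the output, with no intermediate word lists.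
import Mathlib
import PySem

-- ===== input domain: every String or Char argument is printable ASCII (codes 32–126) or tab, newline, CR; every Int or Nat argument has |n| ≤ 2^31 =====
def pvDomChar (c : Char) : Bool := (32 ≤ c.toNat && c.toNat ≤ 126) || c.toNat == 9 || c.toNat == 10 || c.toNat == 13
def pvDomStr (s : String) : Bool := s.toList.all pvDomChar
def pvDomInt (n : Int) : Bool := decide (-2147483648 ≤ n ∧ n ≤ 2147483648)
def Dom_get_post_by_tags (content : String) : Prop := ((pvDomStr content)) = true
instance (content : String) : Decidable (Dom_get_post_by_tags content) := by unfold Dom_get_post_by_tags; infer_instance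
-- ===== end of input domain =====

-- B replaces A's split/append-loop/join with a single character-level scan that emits
-- each wrapped word directly (objective: alternative decomposition, same cost).

-- ===== PORT A =====
-- the f-string '<a href="/tag/{word[1:].lower()}">{word}</a>'
def pvAAnchor (word : List Char) : List Char :=
  "<a href=\"/tag/".toList ++ PySem.Chars.lower (PySem.Chars.slice word (some 1) none)
    ++ "\">".toList ++ word ++ "</a>".toList

-- the loop body: new_content.append(...) for each word
def pvAStep (acc : List (List Char)) (word : List Char) : List (List Char) :=
  if PySem.Chars.isIn ['#'] word then
    acc ++ [PySem.Chars.replace word word (pvAAnchor word)]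
  else
    acc ++ [word]

def get_post_by_tags (content : String) : String :=
  String.ofList
    (PySem.Chars.join [' ']
      ((PySem.Chars.split₀ content.toList).foldl pvAStep []))

-- ===== PORT B =====
-- the conditional expression: wrapped anchor if '#' in word else word
def pvBWrap (word : List Char) : List Char :=
  if PySem.Chars.isIn ['#'] word then
    "<a href=\"/tag/".toList ++ PySem.Chars.lower (PySem.Chars.slice word (some 1) none)
      ++ "\">".toList ++ word ++ "</a>".toList
  else
    word

-- the outer while loop: skip one whitespace char, or scan a whole word
-- (the inner while loop advancing j is the takeWhile/dropWhile pair) and emit it,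
-- preceded by ' ' unless it is the first word
def pvBGo (cs : List Char) (first : Bool) : List Char :=
  match cs with
  | [] => []
  | c :: rest =>
    if PySem.Chars.isspace c then
      pvBGo rest first
    else
      let word := c :: rest.takeWhile (fun d => !PySem.Chars.isspace d)
      (if first then [] else [' ']) ++ pvBWrap word
        ++ pvBGo (rest.dropWhile (fun d => !PySem.Chars.isspace d)) false
termination_by cs.length
decreasing_by
  · simp
  · simp; exact List.length_dropWhile_le _ _

def get_post_by_tags_alt (content : String) : String :=
  String.ofList (pvBGo content.toList true)

-- ===== PRECONDITION & SPEC =====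
def Spec_get_post_by_tags (content : String) (out : String) : Prop := out = get_post_by_tags_alt content
instance (content : String) (out : String) : Decidable (Spec_get_post_by_tags content out) := by unfold Spec_get_post_by_tags; infer_instance

-- ===== CLAIM (what is proved, stated in full; the proofs are below) =====
def Claim_equal_get_post_by_tags : Prop := ∀ (content : String), Dom_get_post_by_tags content → Spec_get_post_by_tags content (get_post_by_tags content)

-- ===== LEMMAS AND PROOFS =====

-- the value A's loop body appends for one word
def pvG (w : List Char) : List Char :=
  if PySem.Chars.isIn ['#'] w then PySem.Chars.replace w w (pvAAnchor w) else w

-- word.replace(word, new) = new for a nonempty word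
theorem pv_replace_self (w new : List Char) (h : w ≠ []) :
    PySem.Chars.replace w w new = new := by
  obtain ⟨c, t, rfl⟩ := List.exists_cons_of_ne_nil h
  simp only [PySem.Chars.replace, List.isEmpty_cons]
  rw [PySem.Chars.replace.go.eq_def]
  simp [List.isPrefixOf_iff_prefix]
  cases t.length <;> rw [PySem.Chars.replace.go.eq_def] <;> simp

theorem pv_bwrap_eq_pvG (w : List Char) (h : w ≠ []) : pvBWrap w = pvG w := by
  unfold pvBWrap pvG pvAAnchor
  split
  · rw [pv_replace_self _ _ h]
  · rfl

theorem pv_go_acc (cs : List Char) : ∀ (curw : List Char) (acc : List (List Char)),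
    PySem.Chars.split₀.go cs curw acc = acc.reverse ++ PySem.Chars.split₀.go cs curw [] := by
  induction cs with
  | nil =>
    intro curw acc
    rw [PySem.Chars.split₀.go.eq_def]
    conv_rhs => rw [PySem.Chars.split₀.go.eq_def]
    by_cases hc : curw.isEmpty = true <;> simp [hc]
  | cons c rest ih =>
    intro curw acc
    rw [PySem.Chars.split₀.go.eq_def]
    conv_rhs => rw [PySem.Chars.split₀.go.eq_def]
    by_cases hs : PySem.Chars.isspace c = true
    · simp only [hs, if_true]
      by_cases hc : curw.isEmpty = true <;> simp only [hc, if_true]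
      · exact ih [] acc
      · simp only [Bool.false_eq_true, if_false]
        rw [ih [] (curw.reverse :: acc), ih [] [curw.reverse]]
        simp
    · simp only [hs, Bool.false_eq_true, if_false]
      exact ih (c :: curw) acc

theorem pv_split₀_space (c : Char) (cs : List Char) (h : PySem.Chars.isspace c = true) :
    PySem.Chars.split₀ (c :: cs) = PySem.Chars.split₀ cs := by
  unfold PySem.Chars.split₀
  rw [PySem.Chars.split₀.go.eq_def]
  simp [h]

theorem pv_go_word (cs : List Char) : ∀ (curw : List Char), curw ≠ [] →
    PySem.Chars.split₀.go cs curw [] =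
      (curw.reverse ++ cs.takeWhile (fun d => !PySem.Chars.isspace d))
        :: PySem.Chars.split₀ (cs.dropWhile (fun d => !PySem.Chars.isspace d)) := by
  induction cs with
  | nil =>
    intro curw h
    rw [PySem.Chars.split₀.go.eq_def]
    simp [h, PySem.Chars.split₀]
    rw [PySem.Chars.split₀.go.eq_def]
    simp
  | cons c rest ih =>
    intro curw h
    rw [PySem.Chars.split₀.go.eq_def]
    by_cases hs : PySem.Chars.isspace c = true
    · rw [List.takeWhile_cons, List.dropWhile_cons]
      simp only [hs, if_true, Bool.not_true, Bool.false_eq_true, if_false,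
        List.isEmpty_iff, h, List.append_nil]
      rw [pv_go_acc rest [] [curw.reverse], pv_split₀_space c rest hs]
      simp [PySem.Chars.split₀]
    · rw [List.takeWhile_cons, List.dropWhile_cons]
      simp only [hs, Bool.false_eq_true, if_false, Bool.not_false, if_true]
      rw [ih (c :: curw) (by simp)]
      simp

theorem pv_split₀_word (c : Char) (cs : List Char) (h : PySem.Chars.isspace c = false) :
    PySem.Chars.split₀ (c :: cs) =
      (c :: cs.takeWhile (fun d => !PySem.Chars.isspace d))
        :: PySem.Chars.split₀ (cs.dropWhile (fun d => !PySem.Chars.isspace d)) := by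
  unfold PySem.Chars.split₀
  rw [PySem.Chars.split₀.go.eq_def]
  simp only [h, Bool.false_eq_true, if_false]
  exact pv_go_word cs [c] (by simp)

theorem pv_join_cons (w : List Char) (ws : List (List Char)) :
    PySem.Chars.join [' '] (w :: ws) = w ++ ws.flatMap (fun v => ' ' :: v) := by
  induction ws generalizing w with
  | nil => simp [PySem.Chars.join, List.intercalate]
  | cons v vs ih =>
    rw [PySem.Chars.join, List.intercalate, List.intersperse_cons₂, List.flatten_cons,
      List.flatten_cons, ← List.intercalate, ← PySem.Chars.join, ih v]
    simp

theorem pv_bgo (cs : List Char) (first : Bool) :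
    pvBGo cs first =
      if first then PySem.Chars.join [' '] ((PySem.Chars.split₀ cs).map pvG)
      else (PySem.Chars.split₀ cs).flatMap (fun w => ' ' :: pvG w) := by
  fun_induction pvBGo cs first with
  | case1 first =>
    cases first <;> rfl
  | case2 first c rest hs ih =>
    rw [ih, pv_split₀_space c rest hs]
  | case3 first c rest hs word ih =>
    have hs' : PySem.Chars.isspace c = false := by
      revert hs; cases PySem.Chars.isspace c <;> simp
    rw [pv_split₀_word c rest hs', ih]
    rw [show word = c :: rest.takeWhile (fun d => !PySem.Chars.isspace d) from rfl]
    rw [pv_bwrap_eq_pvG _ (by simp)]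
    cases first
    · simp
    · rw [if_pos rfl, List.map_cons, pv_join_cons]
      simp [List.flatMap_map]

theorem pv_main (cs : List Char) :
    pvBGo cs true = PySem.Chars.join [' '] ((PySem.Chars.split₀ cs).foldl pvAStep []) := by
  have hstep : pvAStep = fun acc w => acc ++ [pvG w] := by
    funext acc w
    unfold pvAStep pvG
    split <;> rfl
  rw [pv_bgo cs true, if_pos rfl, hstep,
    PySem.List.foldl_append_singleton_eq_map pvG (PySem.Chars.split₀ cs) []]
  rfl

-- ===== VERDICT (by name: the statement is the Claim_ definition above) =====
theorem get_post_by_tags_spec : Claim_equal_get_post_by_tags := by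
  intro content _
  unfold Spec_get_post_by_tags get_post_by_tags get_post_by_tags_alt
  rw [pv_main]
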